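-- pv_equiv track=rewrite | github.com/kong0716/CSE354HW | mood_lyric_generator_Kong_110770716.py | create_trigram_matrix
-- ===== SOURCE A (Python) =====
-- from collections import Counter, defaultdict
--
-- def create_trigram_matrix(tokens, vocab):
--     for i in range(len(tokens)):
--         if tokens[i] not in vocab:
--             tokens[i] = "<OOV>"
--     trigram_list = list(zip(*[tokens[i:] for i in range(3)]))
--     trigram_count = Counter(trigram_list)
--     trigrams = defaultdict(dict)
--     for tup in trigram_list:
--         trigrams[(tup[0], tup[1])][tup[2]] = trigram_count.get(tup)
--     return trigrams
-- ===== SOURCE B (Python) =====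
-- from collections import Counter, defaultdict
--
-- def create_trigram_matrix(tokens, vocab):
--     for i in range(len(tokens)):
--         if tokens[i] not in vocab:
--             tokens[i] = "<OOV>"
--     groups = {}
--     for a, b, c in zip(tokens, tokens[1:], tokens[2:]):
--         groups.setdefault((a, b), []).append(c)
--     out = defaultdict(dict)
--     for ab, cs in groups.items():
--         out[ab] = dict(Counter(cs))
--     return out
-- ===== Notes on version B (the rewrite author's own statement) =====
-- stated objective: alternative
-- what changed: B replaces A's two-phase count-then-populate (materialize the full trigram list, Counter it globally, then re-assign each nested-dict cell per trigram occurrence) with a group-by decomposition: one setdefault pass groups the third words under each bigram key, then each row is produced whole as dict(Counter(group)); no global trigram Counter and no per-trigram nested-dict writes.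
import Mathlib
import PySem

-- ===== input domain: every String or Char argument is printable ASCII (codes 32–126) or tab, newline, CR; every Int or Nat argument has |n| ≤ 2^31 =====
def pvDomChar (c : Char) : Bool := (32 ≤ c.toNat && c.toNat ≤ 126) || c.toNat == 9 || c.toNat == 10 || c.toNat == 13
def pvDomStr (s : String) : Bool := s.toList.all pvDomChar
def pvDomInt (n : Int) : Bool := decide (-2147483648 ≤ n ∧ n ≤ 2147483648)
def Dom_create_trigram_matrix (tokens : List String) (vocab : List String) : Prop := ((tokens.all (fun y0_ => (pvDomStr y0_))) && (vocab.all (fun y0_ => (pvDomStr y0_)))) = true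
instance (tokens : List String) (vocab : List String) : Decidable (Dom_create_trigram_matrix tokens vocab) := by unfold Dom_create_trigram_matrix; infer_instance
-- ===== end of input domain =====

-- B rebuilds the matrix by a group-by decomposition (one pass grouping the third words under
-- each bigram key, then a per-group Counter per row) instead of A's global trigram Counter +
-- per-trigram nested-dict population (objective: alternative). Both Pythons mutate `tokens`
-- in place identically (OOV replacement); the equivalence proved here is about the return value.

-- Python dict primitives on association lists (first match; overwrite in place, append if absent)
def dget {α β : Type} [DecidableEq α] (l : List (α × β)) (k : α) (dv : β) : β :=
  match l with
  | [] => dv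
  | (k', v) :: t => if k' = k then v else dget t k dv

def dset {α β : Type} [DecidableEq α] (l : List (α × β)) (k : α) (v : β) : List (α × β) :=
  match l with
  | [] => [(k, v)]
  | (k', v') :: t => if k' = k then (k, v) :: t else (k', v') :: dset t k v

-- ===== PORT A =====
-- one counting step of Counter(trigram_list)
def cstepA (d : List ((String × String × String) × Int)) (t : String × String × String) :
    List ((String × String × String) × Int) :=
  dset d t (dget d t 0 + 1)

-- one step of A's re-population loop; Counter.get(tup) always hits (tup ∈ trigram_list), ported as dget … 0
def stepA (cnt : List ((String × String × String) × Int))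
    (d : List ((String × String) × List (String × Int))) (t : String × String × String) :
    List ((String × String) × List (String × Int)) :=
  dset d (t.1, t.2.1) (dset (dget d (t.1, t.2.1) []) t.2.2 (dget cnt t 0))

def create_trigram_matrix (tokens : List String) (vocab : List String) : List (String × String × List (String × Int)) :=
  let toks := tokens.map (fun t => if t ∈ vocab then t else "<OOV>")   -- the OOV-replacement loop
  let trigs := toks.zip ((toks.drop 1).zip (toks.drop 2))              -- zip(*[tokens[i:] for i in range(3)])
  let cnt := trigs.foldl cstepA []                                     -- Counter(trigram_list)
  (trigs.foldl (stepA cnt) []).map (fun p => (p.1.1, p.1.2, p.2))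

-- ===== PORT B =====
-- one step of B's grouping pass: groups.setdefault((a, b), []).append(c)
def gstep (d : List ((String × String) × List String)) (t : String × String × String) :
    List ((String × String) × List String) :=
  dset d (t.1, t.2.1) (dget d (t.1, t.2.1) [] ++ [t.2.2])

-- one counting step of Counter(cs) over a group's third words
def cstep (d : List (String × Int)) (c : String) : List (String × Int) :=
  dset d c (dget d c 0 + 1)

def create_trigram_matrix_alt (tokens : List String) (vocab : List String) : List (String × String × List (String × Int)) :=
  let toks := tokens.map (fun t => if t ∈ vocab then t else "<OOV>")   -- the same OOV-replacement loop
  let trigs := toks.zip ((toks.drop 1).zip (toks.drop 2))              -- zip(tokens, tokens[1:], tokens[2:])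
  let groups := trigs.foldl gstep []                                   -- one grouping pass
  groups.map (fun p => (p.1.1, p.1.2, p.2.foldl cstep []))             -- out[ab] = dict(Counter(cs))

-- ===== PRECONDITION & SPEC =====
def Spec_create_trigram_matrix (tokens : List String) (vocab : List String) (out : List (String × String × List (String × Int))) : Prop := out = create_trigram_matrix_alt tokens vocab
instance (tokens : List String) (vocab : List String) (out : List (String × String × List (String × Int))) : Decidable (Spec_create_trigram_matrix tokens vocab out) := by unfold Spec_create_trigram_matrix; infer_instance

-- ===== CLAIM (what is proved, stated in full; the proofs are below) =====
def Claim_equal_create_trigram_matrix : Prop := ∀ (tokens : List String) (vocab : List String), Dom_create_trigram_matrix tokens vocab → Spec_create_trigram_matrix tokens vocab (create_trigram_matrix tokens vocab)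

-- ===== LEMMAS AND PROOFS =====

-- distinct elements in first-occurrence order (Python dict insertion-order), used by the normal form
def addK {α : Type} [DecidableEq α] (ks : List α) (k : α) : List α :=
  if k ∈ ks then ks else ks ++ [k]

def firsts {α : Type} [DecidableEq α] (l : List α) : List α := l.foldl addK []

-- number of occurrences of t in l, as an Int
def cntZ {α : Type} [DecidableEq α] (l : List α) (t : α) : Int :=
  match l with
  | [] => 0
  | x :: xs => (if x = t then 1 else 0) + cntZ xs t

theorem dget_dset {α β : Type} [DecidableEq α] (l : List (α × β)) (k k' : α) (v : β) (dv : β) :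
    dget (dset l k v) k' dv = if k = k' then v else dget l k' dv := by
  induction l with
  | nil => simp [dset, dget]
  | cons h t ih =>
    obtain ⟨a, b⟩ := h
    by_cases hak : a = k
    · subst hak
      by_cases hk' : a = k' <;> simp [dset, dget, hk']
    · by_cases hk' : a = k'
      · subst hk'
        have hka : k ≠ a := fun h => hak h.symm
        simp [dset, dget, hak, hka]
      · simp [dset, dget, hak, hk', ih]

theorem counter_count (S : List (String × String × String))
    (d : List ((String × String × String) × Int)) (t : String × String × String) :
    dget (S.foldl cstepA d) t 0 = dget d t 0 + cntZ S t := by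
  induction S generalizing d with
  | nil => simp [cntZ]
  | cons x xs ih =>
    simp only [List.foldl_cons, ih, cstepA, dget_dset, cntZ]
    by_cases hx : x = t
    · simp [hx]
      ring
    · simp [hx]

-- keys of dset = addK of the keys
theorem keys_dset {α β : Type} [DecidableEq α] (l : List (α × β)) (k : α) (v : β) :
    ((dset l k v).map Prod.fst) = addK (l.map Prod.fst) k := by
  induction l with
  | nil => simp [dset, addK]
  | cons hd t ih =>
    obtain ⟨a, b⟩ := hd
    by_cases hak : a = k
    · simp [dset, hak, addK]
    · simp only [dset, if_neg hak, List.map_cons, ih, addK]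
      by_cases hk : k ∈ t.map Prod.fst <;> simp [hk, Ne.symm hak]

theorem nodup_addK {α : Type} [DecidableEq α] {ks : List α} (k : α) (h : ks.Nodup) :
    (addK ks k).Nodup := by
  unfold addK
  by_cases hk : k ∈ ks
  · simp [hk, h]
  · rw [if_neg hk]
    refine List.Nodup.append h (List.nodup_singleton k) ?_
    intro a ha hak
    rw [List.mem_singleton] at hak
    subst hak
    exact hk ha

-- in a nodup-keyed assoc list, the list is determined by its keys and lookups
theorem assoc_eta {α β : Type} [DecidableEq α] (dv : β) :
    ∀ (l : List (α × β)), (l.map Prod.fst).Nodup →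
      l = (l.map Prod.fst).map (fun k => (k, dget l k dv)) := by
  intro l
  induction l with
  | nil => intro; rfl
  | cons hd t ih =>
    obtain ⟨a, b⟩ := hd
    intro hn
    simp only [List.map_cons, List.nodup_cons] at hn ⊢
    have h2 : (t.map Prod.fst).map (fun k => (k, dget ((a, b) :: t) k dv))
        = (t.map Prod.fst).map (fun k => (k, dget t k dv)) :=
      List.map_congr_left (fun k hk => by
        have hak : a ≠ k := fun h => hn.1 (h ▸ hk)
        simp [dget, hak])
    rw [h2, ← ih hn.2]
    simp [dget]

-- the group-by characterisation of a fold of nested dset updates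
theorem fold_dset_eta {α β γ : Type} [DecidableEq α] [DecidableEq γ]
    (key : γ → α) (g : β → γ → β) (b0 : β) :
    ∀ (L : List γ) (d : List (α × β)), (d.map Prod.fst).Nodup →
      L.foldl (fun d t => dset d (key t) (g (dget d (key t) b0) t)) d
        = ((L.map key).foldl addK (d.map Prod.fst)).map
            (fun k => (k, (L.filter (fun t => decide (key t = k))).foldl g (dget d k b0))) := by
  intro L
  induction L with
  | nil =>
    intro d hn
    simpa using assoc_eta b0 d hn
  | cons t L ih =>
    intro d hn
    simp only [List.foldl_cons, List.map_cons]
    have hn' : (((dset d (key t) (g (dget d (key t) b0) t)).map Prod.fst)).Nodup := by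
      rw [keys_dset]; exact nodup_addK _ hn
    rw [ih _ hn', keys_dset]
    apply List.map_congr_left
    intro k hk
    congr 1
    rw [List.filter_cons]
    by_cases hkt : key t = k
    · subst hkt
      simp [dget_dset]
    · simp [hkt, dget_dset]

theorem mem_foldl_addK {α : Type} [DecidableEq α] {x : α} :
    ∀ (l acc : List α), x ∈ l.foldl addK acc → x ∈ acc ∨ x ∈ l := by
  intro l
  induction l with
  | nil => intro acc h; exact Or.inl h
  | cons a l ih =>
    intro acc h
    rcases ih _ h with h' | h'
    · unfold addK at h'
      by_cases ha : a ∈ acc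
      · rw [if_pos ha] at h'; exact Or.inl h'
      · rw [if_neg ha] at h'
        rcases List.mem_append.mp h' with h'' | h''
        · exact Or.inl h''
        · rw [List.mem_singleton] at h''; subst h''; exact Or.inr (List.mem_cons_self)
    · exact Or.inr (List.mem_cons_of_mem _ h')

theorem mem_firsts {α : Type} [DecidableEq α] {x : α} {l : List α} (h : x ∈ firsts l) : x ∈ l := by
  rcases mem_foldl_addK l [] h with h' | h'
  · cases h'
  · exact h'

-- a fold that ignores its accumulator over a nonempty list of identical elements
theorem foldl_const {γ δ : Type} (h : γ → δ) (a : γ) :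
    ∀ (S : List γ) (x : δ), (∀ t ∈ S, t = a) → S ≠ [] → S.foldl (fun _ t => h t) x = h a := by
  intro S
  induction S with
  | nil => intro x _ hne; exact absurd rfl hne
  | cons b S ih =>
    intro x hall _
    have hb : b = a := hall b List.mem_cons_self
    cases S with
    | nil => simp [hb]
    | cons c S' =>
      simp only [List.foldl_cons]
      exact ih (h b) (fun t ht => hall t (List.mem_cons_of_mem _ ht)) (by simp)

-- counting c among the third components of the bigram-k group = counting the full trigram in L
theorem count_group (k : String × String) (c : String) :
    ∀ (L : List (String × String × String)),
      (PySem.List.count ((L.filter (fun t => decide ((t.1, t.2.1) = k))).map (fun t => t.2.2)) c : Int)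
        = cntZ L (k.1, k.2, c) := by
  intro L
  induction L with
  | nil => simp [cntZ, PySem.List.count_eq]
  | cons t L ih =>
    obtain ⟨a, b, cc⟩ := t
    simp only [PySem.List.count_eq, List.filter_cons] at ih ⊢
    by_cases h1 : ((a, b) : String × String) = k
    · subst h1
      simp only [decide_true, if_true, List.map_cons, List.count_cons, cntZ]
      by_cases h2 : cc = c
      · subst h2
        simp only [beq_self_eq_true, if_true]
        push_cast
        rw [ih]
        ring
      · have hcc : (cc == c) = false := beq_false_of_ne h2
        have ht : ((a, b, cc) : String × String × String) ≠ ((a, b).1, (a, b).2, c) := by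
          simp [h2]
        simp only [hcc, Bool.false_eq_true, if_false, if_neg ht]
        push_cast
        rw [ih]
        ring
    · have hb : (decide (((a, b) : String × String) = k)) = false := decide_eq_false h1
      have ht : ((a, b, cc) : String × String × String) ≠ (k.1, k.2, c) := by
        intro h
        injection h with u v
        injection v with v1 v2
        exact h1 (by rw [u, v1])
      simp only [hb, Bool.false_eq_true, if_false, cntZ, if_neg ht]
      rw [ih]
      ring

-- the main characterisation: A's two folds produce exactly B's group-by expression
theorem main_eq (L : List (String × String × String)) :
    (L.foldl (stepA (L.foldl cstepA [])) []).map (fun p => (p.1.1, p.1.2, p.2))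
      = (firsts (L.map (fun t => (t.1, t.2.1)))).map (fun ab =>
          (ab.1, ab.2,
            (firsts ((L.filter (fun t => decide ((t.1, t.2.1) = ab))).map (fun t => t.2.2))).map
              (fun c => (c, (PySem.List.count ((L.filter (fun t => decide ((t.1, t.2.1) = ab))).map (fun t => t.2.2)) c : Int))))) := by
  set cnt := L.foldl cstepA [] with hcnt
  have hstep : stepA cnt = fun d t => dset d ((fun (t : String × String × String) => (t.1, t.2.1)) t)
      ((fun (v : List (String × Int)) (t : String × String × String) => dset v t.2.2 (dget cnt t 0))
        (dget d ((fun (t : String × String × String) => (t.1, t.2.1)) t) []) t) := rfl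
  have h1 := fold_dset_eta (fun (t : String × String × String) => (t.1, t.2.1))
    (fun (v : List (String × Int)) (t : String × String × String) => dset v t.2.2 (dget cnt t 0))
    ([] : List (String × Int)) L [] (by simp)
  rw [hstep, h1, List.map_map]
  simp only [firsts]
  apply List.map_congr_left
  intro k _
  simp only [Function.comp]
  refine congrArg (fun z => (k.1, k.2, z)) ?_
  -- inner fold: another nested-dset fold, characterised the same way
  have hinner : (fun (v : List (String × Int)) (t : String × String × String) => dset v t.2.2 (dget cnt t 0))
      = fun v t => dset v ((fun (t : String × String × String) => t.2.2) t)
          ((fun (_ : Int) (t : String × String × String) => dget cnt t 0)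
            (dget v ((fun (t : String × String × String) => t.2.2) t) 0) t) := rfl
  have h2 := fold_dset_eta (fun (t : String × String × String) => t.2.2)
    (fun (_ : Int) (t : String × String × String) => dget cnt t 0) (0 : Int)
    (L.filter (fun t => decide ((t.1, t.2.1) = k))) [] (by simp)
  rw [show dget ([] : List ((String × String) × List (String × Int))) k [] = [] from rfl, hinner]
  refine Eq.trans h2 ?_
  apply List.map_congr_left
  intro c hc
  refine congrArg (fun z => (c, z)) ?_
  rw [show dget ([] : List (String × Int)) c 0 = 0 from rfl]
  -- the innermost fold is over a nonempty list of copies of (k.1, k.2, c)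
  have hall : ∀ t ∈ (L.filter (fun t => decide ((t.1, t.2.1) = k))).filter (fun t => decide (t.2.2 = c)),
      t = (k.1, k.2, c) := by
    intro t ht
    have h1 := List.mem_filter.mp ht
    have h2 := List.mem_filter.mp h1.1
    have hk : (t.1, t.2.1) = k := by simpa using h2.2
    have hc' : t.2.2 = c := by simpa using h1.2
    have : t = (t.1, t.2.1, t.2.2) := rfl
    rw [this, hc']
    rw [show t.1 = k.1 from congrArg Prod.fst hk, show t.2.1 = k.2 from congrArg Prod.snd hk]
  have hne : (L.filter (fun t => decide ((t.1, t.2.1) = k))).filter (fun t => decide (t.2.2 = c)) ≠ [] := by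
    have hc' : c ∈ (L.filter (fun t => decide ((t.1, t.2.1) = k))).map (fun t => t.2.2) :=
      mem_firsts (by simpa [firsts] using hc)
    obtain ⟨t, htmem, htc⟩ := List.mem_map.mp hc'
    intro hemp
    have : t ∈ (L.filter (fun t => decide ((t.1, t.2.1) = k))).filter (fun t => decide (t.2.2 = c)) :=
      List.mem_filter.mpr ⟨htmem, by simp [htc]⟩
    rw [hemp] at this
    cases this
  rw [foldl_const (fun t => dget cnt t 0) (k.1, k.2, c) _ 0 hall hne, hcnt,
    counter_count, ← count_group]
  simp [dget]

-- a fold of list-appends from any accumulator is append of the map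
theorem foldl_append_map (S : List (String × String × String)) :
    ∀ (acc : List String), S.foldl (fun v t => v ++ [t.2.2]) acc = acc ++ S.map (fun t => t.2.2) := by
  induction S with
  | nil => intro acc; simp
  | cons t S ih => intro acc; simp [ih]

-- a fold of +1 from any accumulator counts the length
theorem foldl_add_one (l : List String) :
    ∀ (x : Int), l.foldl (fun v (_ : String) => v + 1) x = x + l.length := by
  induction l with
  | nil => intro x; simp
  | cons c l ih => intro x; simp [ih]; ring

theorem length_filter_count (c : String) (cs : List String) :
    ((cs.filter (fun x => decide (x = c))).length : Int) = (PySem.List.count cs c : Int) := by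
  induction cs with
  | nil => simp [PySem.List.count_eq]
  | cons x cs ih =>
    simp only [PySem.List.count_eq, List.filter_cons, List.count_cons] at ih ⊢
    by_cases hx : x = c
    · subst hx
      simp only [decide_true, if_true, List.length_cons, beq_self_eq_true]
      push_cast
      omega
    · have hb : (x == c) = false := beq_false_of_ne hx
      simp only [decide_eq_false hx, Bool.false_eq_true, if_false, hb]
      push_cast at ih ⊢
      omega

-- Counter(cs): the counting fold is the dedupe-and-count normal form
theorem counter_eta (cs : List String) :
    cs.foldl cstep [] = (firsts cs).map (fun c => (c, (PySem.List.count cs c : Int))) := by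
  have hc : cstep = fun d c => dset d ((fun (c : String) => c) c)
      ((fun (v : Int) (_ : String) => v + 1) (dget d ((fun (c : String) => c) c) 0) c) := rfl
  have h := fold_dset_eta (fun (c : String) => c) (fun (v : Int) (_ : String) => v + 1)
    (0 : Int) cs [] (by simp)
  rw [hc, h]
  simp only [firsts, List.map_id', List.map_nil]
  apply List.map_congr_left
  intro c _
  refine congrArg (fun z => (c, z)) ?_
  rw [show dget ([] : List (String × Int)) c 0 = 0 from rfl, foldl_add_one, ← length_filter_count c]
  simp

-- B's grouping pass + per-group Counter produces the same normal form
theorem alt_eq (L : List (String × String × String)) :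
    (L.foldl gstep []).map (fun p => (p.1.1, p.1.2, p.2.foldl cstep []))
      = (firsts (L.map (fun t => (t.1, t.2.1)))).map (fun ab =>
          (ab.1, ab.2,
            (firsts ((L.filter (fun t => decide ((t.1, t.2.1) = ab))).map (fun t => t.2.2))).map
              (fun c => (c, (PySem.List.count ((L.filter (fun t => decide ((t.1, t.2.1) = ab))).map (fun t => t.2.2)) c : Int))))) := by
  have hg : gstep = fun d t => dset d ((fun (t : String × String × String) => (t.1, t.2.1)) t)
      ((fun (v : List String) (t : String × String × String) => v ++ [t.2.2])
        (dget d ((fun (t : String × String × String) => (t.1, t.2.1)) t) []) t) := rfl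
  have h1 := fold_dset_eta (fun (t : String × String × String) => (t.1, t.2.1))
    (fun (v : List String) (t : String × String × String) => v ++ [t.2.2])
    ([] : List String) L [] (by simp)
  rw [hg, h1, List.map_map]
  simp only [firsts]
  apply List.map_congr_left
  intro k _
  simp only [Function.comp]
  rw [show dget ([] : List ((String × String) × List String)) k [] = [] from rfl,
    foldl_append_map, List.nil_append, counter_eta]
  simp only [firsts]

-- ===== VERDICT (by name: the statement is the Claim_ definition above) =====
theorem create_trigram_matrix_spec : Claim_equal_create_trigram_matrix := by
  intro tokens vocab _
  unfold Spec_create_trigram_matrix create_trigram_matrix create_trigram_matrix_alt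
  exact (main_eq _).trans (alt_eq _).symm
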